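-- pv_equiv track=rewrite | github.com/TheAlexBoss/TFGMates | _old/generar_tablas.py | cifrado_combinaciones_lineales
-- ===== SOURCE A (Python) =====
-- def funcion_s(mensaje, clave,
--               orden_inverso=False):
--     resultado = []
--
--     for i in range(len(mensaje)):
--         resultado.append(mensaje[i] + clave[
--             i]) if not orden_inverso else resultado.append(
--             clave[i] + mensaje[i])
--
--     return resultado
--
-- def funcion_d(mensaje, clave,
--               orden_inverso=False):
--     resultado = []
--
--     for i in range(len(mensaje)):
--         resultado.append(mensaje[i] - clave[
--             i]) if not orden_inverso else resultado.append(
--             clave[i] - mensaje[i])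
--
--     return resultado
--
-- def cifrado_combinaciones_lineales(mensaje, clave,
--                                    seed_aleatoria):
--     texto_cifrado = []
--     cifrados = [funcion_s(mensaje, clave),
--                 funcion_d(mensaje, clave,
--                           orden_inverso=True),
--                 funcion_d(mensaje, clave)]
--
--     for i in range(len(mensaje)):
--         aux = seed_aleatoria[0] * cifrados[0][i] + \
--               seed_aleatoria[1] * cifrados[1][i] + \
--               seed_aleatoria[2] * cifrados[2][
--                   i]
--         texto_cifrado.append(aux)
--
--     return texto_cifrado
-- ===== SOURCE B (Python) =====
-- def cifrado_combinaciones_lineales(mensaje, clave, seed_aleatoria):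
--     # One fused pass: no helper functions, no intermediate transform lists.
--     return [seed_aleatoria[0] * (mensaje[i] + clave[i])
--             + seed_aleatoria[1] * (clave[i] - mensaje[i])
--             + seed_aleatoria[2] * (mensaje[i] - clave[i])
--             for i in range(len(mensaje))]
-- ===== Notes on version B (the rewrite author's own statement) =====
-- stated objective: simpler
-- what changed: Replaced the two helper functions, the three materialized intermediate transform lists and the second combining loop by one fused comprehension over range(len(mensaje)) computing the same three-term expression per element.
import Mathlib
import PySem

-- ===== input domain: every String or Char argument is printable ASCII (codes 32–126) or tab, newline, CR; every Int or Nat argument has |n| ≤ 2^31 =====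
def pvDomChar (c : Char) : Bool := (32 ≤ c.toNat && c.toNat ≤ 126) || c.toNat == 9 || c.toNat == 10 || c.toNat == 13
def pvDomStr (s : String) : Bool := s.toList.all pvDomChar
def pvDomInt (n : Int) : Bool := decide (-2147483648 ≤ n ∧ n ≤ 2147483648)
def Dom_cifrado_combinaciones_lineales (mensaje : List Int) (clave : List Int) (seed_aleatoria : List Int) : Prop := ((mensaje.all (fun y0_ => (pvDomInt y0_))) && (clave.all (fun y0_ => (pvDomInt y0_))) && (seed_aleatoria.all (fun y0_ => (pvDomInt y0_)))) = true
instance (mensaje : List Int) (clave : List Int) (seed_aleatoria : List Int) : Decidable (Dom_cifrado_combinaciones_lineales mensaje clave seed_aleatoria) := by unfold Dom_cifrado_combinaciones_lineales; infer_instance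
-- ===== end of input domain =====

-- B fuses A's two helpers, three intermediate lists and second index loop into one indexed pass (objective: simpler).


-- ===== PORT A =====
-- funcion_s; out-of-range indexing (Python IndexError) is excluded by Pre_, pyGetD's default is never read there
def pvFuncionS (mensaje clave : List Int) (orden_inverso : Bool) : List Int :=
  (PySem.List.pyRange 0 mensaje.length 1).foldl (fun resultado i =>
    if orden_inverso = false then
      resultado ++ [PySem.List.pyGetD mensaje i 0 + PySem.List.pyGetD clave i 0]
    else
      resultado ++ [PySem.List.pyGetD clave i 0 + PySem.List.pyGetD mensaje i 0]) []

-- funcion_d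
def pvFuncionD (mensaje clave : List Int) (orden_inverso : Bool) : List Int :=
  (PySem.List.pyRange 0 mensaje.length 1).foldl (fun resultado i =>
    if orden_inverso = false then
      resultado ++ [PySem.List.pyGetD mensaje i 0 - PySem.List.pyGetD clave i 0]
    else
      resultado ++ [PySem.List.pyGetD clave i 0 - PySem.List.pyGetD mensaje i 0]) []

def cifrado_combinaciones_lineales (mensaje : List Int) (clave : List Int) (seed_aleatoria : List Int) : List Int :=
  let cifrados : List (List Int) :=
    [pvFuncionS mensaje clave false, pvFuncionD mensaje clave true, pvFuncionD mensaje clave false]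
  (PySem.List.pyRange 0 mensaje.length 1).foldl (fun texto_cifrado i =>
    let aux := PySem.List.pyGetD seed_aleatoria 0 0 * PySem.List.pyGetD (PySem.List.pyGetD cifrados 0 []) i 0
             + PySem.List.pyGetD seed_aleatoria 1 0 * PySem.List.pyGetD (PySem.List.pyGetD cifrados 1 []) i 0
             + PySem.List.pyGetD seed_aleatoria 2 0 * PySem.List.pyGetD (PySem.List.pyGetD cifrados 2 []) i 0
    texto_cifrado ++ [aux]) []

-- ===== PORT B =====
-- one fused comprehension over range(len(mensaje)); indexing is in range under Pre_
def cifrado_combinaciones_lineales_alt (mensaje : List Int) (clave : List Int) (seed_aleatoria : List Int) : List Int :=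
  (PySem.List.pyRange 0 mensaje.length 1).map (fun i =>
    PySem.List.pyGetD seed_aleatoria 0 0 * (PySem.List.pyGetD mensaje i 0 + PySem.List.pyGetD clave i 0)
    + PySem.List.pyGetD seed_aleatoria 1 0 * (PySem.List.pyGetD clave i 0 - PySem.List.pyGetD mensaje i 0)
    + PySem.List.pyGetD seed_aleatoria 2 0 * (PySem.List.pyGetD mensaje i 0 - PySem.List.pyGetD clave i 0))

-- ===== PRECONDITION & SPEC =====
-- A raises IndexError when clave is shorter than mensaje, or when mensaje is nonempty and
-- seed_aleatoria has fewer than 3 elements; exactly those inputs are excluded (B raises there too).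
def Pre_cifrado_combinaciones_lineales (mensaje : List Int) (clave : List Int) (seed_aleatoria : List Int) : Prop :=
  mensaje.length ≤ clave.length ∧ (mensaje = [] ∨ 3 ≤ seed_aleatoria.length)
instance (mensaje : List Int) (clave : List Int) (seed_aleatoria : List Int) : Decidable (Pre_cifrado_combinaciones_lineales mensaje clave seed_aleatoria) := by unfold Pre_cifrado_combinaciones_lineales; infer_instance
def pvWitness_cifrado_combinaciones_lineales : List Int × List Int × List Int := ([1, 2], [3, 5], [2, 7, 11])

def Spec_cifrado_combinaciones_lineales (mensaje : List Int) (clave : List Int) (seed_aleatoria : List Int) (out : List Int) : Prop := out = cifrado_combinaciones_lineales_alt mensaje clave seed_aleatoria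
instance (mensaje : List Int) (clave : List Int) (seed_aleatoria : List Int) (out : List Int) : Decidable (Spec_cifrado_combinaciones_lineales mensaje clave seed_aleatoria out) := by unfold Spec_cifrado_combinaciones_lineales; infer_instance

-- ===== CLAIM =====
def Claim_equal_cifrado_combinaciones_lineales : Prop := ∀ (mensaje : List Int) (clave : List Int) (seed_aleatoria : List Int), Dom_cifrado_combinaciones_lineales mensaje clave seed_aleatoria → Pre_cifrado_combinaciones_lineales mensaje clave seed_aleatoria → Spec_cifrado_combinaciones_lineales mensaje clave seed_aleatoria (cifrado_combinaciones_lineales mensaje clave seed_aleatoria)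

-- ===== LEMMAS AND PROOFS =====

theorem pvFuncionS_false_eq (m c : List Int) :
    pvFuncionS m c false
    = (PySem.List.pyRange 0 m.length 1).map
        (fun i => PySem.List.pyGetD m i 0 + PySem.List.pyGetD c i 0) := by
  unfold pvFuncionS
  simp only [if_true, PySem.List.foldl_append_singleton_eq_map, List.nil_append]

theorem pvFuncionD_false_eq (m c : List Int) :
    pvFuncionD m c false
    = (PySem.List.pyRange 0 m.length 1).map
        (fun i => PySem.List.pyGetD m i 0 - PySem.List.pyGetD c i 0) := by
  unfold pvFuncionD
  simp only [if_true, PySem.List.foldl_append_singleton_eq_map, List.nil_append]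

theorem pvFuncionD_true_eq (m c : List Int) :
    pvFuncionD m c true
    = (PySem.List.pyRange 0 m.length 1).map
        (fun i => PySem.List.pyGetD c i 0 - PySem.List.pyGetD m i 0) := by
  unfold pvFuncionD
  simp only [Bool.true_eq_false, if_false, PySem.List.foldl_append_singleton_eq_map, List.nil_append]

-- evaluating the literal cifrados list at indices 1 and 2
theorem pv_getD_list3_one (a b c : List Int) : PySem.List.pyGetD [a, b, c] 1 [] = b := rfl
theorem pv_getD_list3_two (a b c : List Int) : PySem.List.pyGetD [a, b, c] 2 [] = c := rfl

-- ===== VERDICT =====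
theorem cifrado_combinaciones_lineales_spec : Claim_equal_cifrado_combinaciones_lineales := by
  intro m c s _ _
  unfold Spec_cifrado_combinaciones_lineales
  unfold cifrado_combinaciones_lineales cifrado_combinaciones_lineales_alt
  simp only [PySem.List.foldl_append_singleton_eq_map, List.nil_append,
    pvFuncionS_false_eq, pvFuncionD_false_eq, pvFuncionD_true_eq,
    PySem.List.pyGetD_zero_cons, pv_getD_list3_one, pv_getD_list3_two]
  refine List.map_congr_left (fun i hi => ?_)
  have hmem := (PySem.List.mem_pyRange_one).mp hi
  rw [PySem.List.pyGetD_map_pyRange_of_nonneg _ _ _ _ hmem.1 (by simpa using hmem.2),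
      PySem.List.pyGetD_map_pyRange_of_nonneg _ _ _ _ hmem.1 (by simpa using hmem.2),
      PySem.List.pyGetD_map_pyRange_of_nonneg _ _ _ _ hmem.1 (by simpa using hmem.2)]
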